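-- pv_equiv track=rewrite | github.com/mrigankpawagi/fuzz4py | fuzz4py/inputs/456.py | jit_target_function
-- ===== SOURCE A (Python) =====
-- def jit_target_function(input_list):
--     if not input_list:
--         return "Empty list"  # Handle empty list
--     total = 0
--     for i in range(100000):
--         try:
--             total += input_list[i % len(input_list)]
--         except IndexError:
--             return "IndexError: list index out of range"
--         except Exception as e:
--             return f"Exception in loop: {type(e).__name__}-{e}"
--     return total
-- ===== SOURCE B (Python) =====
-- def jit_target_function(input_list):
--     if not input_list:
--         return "Empty list"  # same guard as A; excluded by Pre_ (non-int value)
--     q, r = divmod(100000, len(input_list))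
--     return q * sum(input_list) + sum(input_list[:r])
-- ===== Notes on version B (the rewrite author's own statement) =====
-- stated objective: simpler
-- what changed: Replaces the 100000-iteration cyclic-index loop by the closed form q*sum(list)+sum(list[:r]) with q,r = divmod(100000, len(list)), exploiting that integer addition is order-independent.
-- outside the precondition, e.g. on jit_target_function([]): A returns 'Empty list', B returns 'Empty list'
import Mathlib
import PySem

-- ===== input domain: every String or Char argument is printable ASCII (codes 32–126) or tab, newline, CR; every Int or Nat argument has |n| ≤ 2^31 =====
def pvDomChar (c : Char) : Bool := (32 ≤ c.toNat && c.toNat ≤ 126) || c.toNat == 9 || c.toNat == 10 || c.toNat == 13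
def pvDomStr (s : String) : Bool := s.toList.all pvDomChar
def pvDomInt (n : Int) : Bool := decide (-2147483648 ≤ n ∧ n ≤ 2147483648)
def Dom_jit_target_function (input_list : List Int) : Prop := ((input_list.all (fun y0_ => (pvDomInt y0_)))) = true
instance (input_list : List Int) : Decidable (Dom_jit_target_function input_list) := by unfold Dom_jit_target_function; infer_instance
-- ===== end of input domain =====

-- B replaces the 100000-step cyclic-index summation loop by the closed form
-- q*sum + sum(prefix r) with q, r = divmod(100000, len) — objective: simpler (loop eliminated).

-- ===== PORT A =====
-- Python A sums input_list[i % len(input_list)] for i in range(100000).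
-- For a nonempty list the index is always in range, so the except branches are unreachable
-- (pyGetD's default is never used); the empty-list string return is outside Pre_.
def jit_target_function (input_list : List Int) : Int :=
  if input_list = [] then 0  -- Python returns the string "Empty list" here; excluded by Pre_
  else
    (PySem.List.pyRange 0 100000 1).foldl
      (fun total i =>
        total + PySem.List.pyGetD input_list (PySem.Int.mod i (PySem.List.len input_list)) 0) 0

-- ===== PORT B =====
def jit_target_function_alt (input_list : List Int) : Int :=
  if input_list = [] then 0  -- Python returns the string "Empty list" here; excluded by Pre_
  else
    let n := PySem.List.len input_list
    let q := PySem.Int.floordiv 100000 n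
    let r := PySem.Int.mod 100000 n
    q * input_list.sum + (PySem.List.slice input_list none (some r)).sum

-- ===== PRECONDITION & SPEC =====
-- Pre_ excludes only the empty list, on which Python A returns the string "Empty list",
-- a value outside the declared return type Int.
def Pre_jit_target_function (input_list : List Int) : Prop := input_list ≠ []
instance (input_list : List Int) : Decidable (Pre_jit_target_function input_list) := by
  unfold Pre_jit_target_function; infer_instance
def pvWitness_jit_target_function : List Int := ([1, 2, 3])

def Spec_jit_target_function (input_list : List Int) (out : Int) : Prop := out = jit_target_function_alt input_list
instance (input_list : List Int) (out : Int) : Decidable (Spec_jit_target_function input_list out) := by unfold Spec_jit_target_function; infer_instance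

-- ===== CLAIM (what is proved, stated in full; the proofs are below) =====
def Claim_equal_jit_target_function : Prop := ∀ (input_list : List Int), Dom_jit_target_function input_list → Pre_jit_target_function input_list → Spec_jit_target_function input_list (jit_target_function input_list)

-- ===== LEMMAS AND PROOFS =====

-- sum of l.getD over range c is the sum of the prefix of length c (getD pads with 0, take clamps)
theorem pv_sum_range_getD (l : List Int) (c : Nat) :
    ((List.range c).map (fun k => l.getD k 0)).sum = (l.take c).sum := by
  induction c with
  | zero => simp
  | succ c ih =>
    rw [List.range_succ, List.map_append, List.sum_append, ih, List.take_add_one,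
        List.sum_append]
    simp [List.getD_eq_getElem?_getD]
    cases l[c]? <;> simp

-- one block of the cyclic loop, starting at a multiple of the length, sums a prefix
theorem pv_block (l : List Int) (hn : 0 < l.length) (m : Int) (c : Nat) (hc : c ≤ l.length) :
    ((PySem.List.pyRange (m * l.length) (m * l.length + c) 1).map
      (fun i => PySem.List.pyGetD l (PySem.Int.mod i (l.length : Int)) 0)).sum
    = (l.take c).sum := by
  rw [PySem.List.pyRange_one, List.map_map]
  have hcut : (m * ↑l.length + ↑c - m * ↑l.length).toNat = c := by omega
  rw [hcut, ← pv_sum_range_getD l c]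
  refine congrArg List.sum (List.map_congr_left ?_)
  intro k hk
  rw [List.mem_range] at hk
  have hmod : PySem.Int.mod (m * ↑l.length + ↑k) (l.length : Int) = (k : Int) := by
    rw [PySem.Int.mod_eq_emod_of_pos (by exact_mod_cast hn),
        show m * (l.length : Int) + ↑k = ↑k + ↑l.length * m by ring,
        Int.add_mul_emod_self_left]
    exact Int.emod_eq_of_lt (by positivity)
      (by exact_mod_cast lt_of_lt_of_le hk hc)
  simp [hmod]

-- q full cycles sum to q * sum
theorem pv_cycles (l : List Int) (hn : 0 < l.length) (q : Nat) :
    ((PySem.List.pyRange 0 ((q * l.length : Nat) : Int) 1).map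
      (fun i => PySem.List.pyGetD l (PySem.Int.mod i (l.length : Int)) 0)).sum
    = (q : Int) * l.sum := by
  induction q with
  | zero => simp [PySem.List.pyRange_one_eq_nil]
  | succ q ih =>
    rw [PySem.List.pyRange_one_append 0 ((q * l.length : Nat) : Int) _
          (by positivity) (by push_cast; nlinarith),
        List.map_append, List.sum_append, ih]
    have hb := pv_block l hn (q : Int) l.length (le_refl _)
    rw [List.take_length] at hb
    have harg : ((q + 1) * l.length : Nat) = ((q * l.length : Nat) : Int) + l.length := by
      push_cast; ring
    have harg2 : ((q * l.length : Nat) : Int) = (q : Int) * l.length := by push_cast; ring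
    rw [harg, harg2, hb]
    push_cast; ring

-- full cycles plus a partial block
theorem pv_loop (l : List Int) (hn : 0 < l.length) (q r : Nat) (hr : r ≤ l.length) :
    ((PySem.List.pyRange 0 ((q * l.length + r : Nat) : Int) 1).map
      (fun i => PySem.List.pyGetD l (PySem.Int.mod i (l.length : Int)) 0)).sum
    = (q : Int) * l.sum + (l.take r).sum := by
  rw [PySem.List.pyRange_one_append 0 ((q * l.length : Nat) : Int) _
        (by positivity) (by push_cast; omega),
      List.map_append, List.sum_append, pv_cycles l hn q]
  have harg : ((q * l.length + r : Nat) : Int) = (q : Int) * l.length + r := by push_cast; ring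
  have harg2 : ((q * l.length : Nat) : Int) = (q : Int) * l.length := by push_cast; ring
  rw [harg, harg2, pv_block l hn (q : Int) r hr]

-- ===== VERDICT (by name: the statement is the Claim_ definition above) =====
theorem jit_target_function_spec : Claim_equal_jit_target_function := by
  intro l _ hpre
  unfold Spec_jit_target_function jit_target_function jit_target_function_alt
  rw [if_neg hpre, if_neg hpre]
  have hn : 0 < l.length := List.length_pos_iff.mpr hpre
  rw [PySem.List.foldl_add, PySem.List.len_eq]
  have hq : PySem.Int.floordiv 100000 (l.length : Int) = ((100000 / l.length : Nat) : Int) := by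
    have := PySem.Int.floordiv_natCast 100000 l.length
    exact_mod_cast this
  have hm : PySem.Int.mod 100000 (l.length : Int) = ((100000 % l.length : Nat) : Int) := by
    have := PySem.Int.mod_natCast 100000 l.length
    exact_mod_cast this
  have h := Nat.div_add_mod 100000 l.length
  rw [Nat.mul_comm] at h
  have hsplit : (100000 : Int) =
      (((100000 / l.length) * l.length + 100000 % l.length : Nat) : Int) := by
    rw [h]; norm_num
  have hloop := pv_loop l hn (100000 / l.length) (100000 % l.length)
        (le_of_lt (Nat.mod_lt _ hn))
  rw [← hsplit] at hloop
  simp only [hloop, hq, hm, PySem.List.slice_to_natCast]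
  ring
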